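-- pv_equiv track=rewrite | github.com/dejiehu/Equivalence_division | special_decision_set_value/particle_size_increase_set_value.py | logic_operation
-- ===== SOURCE A (Python) =====
-- def logic_operation(diffItem_list):#析取，吸收
--     DM_list = sorted(diffItem_list, key=lambda i: len(i), reverse=False)
--     m = len(DM_list) - 1# 吸收多余的集合
--     while m > 0: #m从后往前
--         n = 0  #从前往后
--         while n < m:
--             if set(DM_list[n]).issubset(DM_list[m]):
--                 del DM_list[m]
--                 break
--             n += 1
--         m -= 1
--     return DM_list
-- ===== SOURCE B (Python) =====
-- def logic_operation(diffItem_list):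
--     # Forward sweep: grow a minimal antichain instead of deleting from the back.
--     kept = []
--     for item in sorted(diffItem_list, key=len):
--         if not any(set(k).issubset(item) for k in kept):
--             kept.append(item)
--     return kept
-- ===== Notes on version B (the rewrite author's own statement) =====
-- stated objective: simpler
-- what changed: Replaces A's backward deletion loop (index m from the end, inner scan over all earlier originals, del on the mutated list) with a forward accumulation: keep an item only if no already-kept item is a subset of it; kept stays an antichain so the inner test runs over survivors only, and no index arithmetic or in-place deletion is needed.
import Mathlib
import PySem

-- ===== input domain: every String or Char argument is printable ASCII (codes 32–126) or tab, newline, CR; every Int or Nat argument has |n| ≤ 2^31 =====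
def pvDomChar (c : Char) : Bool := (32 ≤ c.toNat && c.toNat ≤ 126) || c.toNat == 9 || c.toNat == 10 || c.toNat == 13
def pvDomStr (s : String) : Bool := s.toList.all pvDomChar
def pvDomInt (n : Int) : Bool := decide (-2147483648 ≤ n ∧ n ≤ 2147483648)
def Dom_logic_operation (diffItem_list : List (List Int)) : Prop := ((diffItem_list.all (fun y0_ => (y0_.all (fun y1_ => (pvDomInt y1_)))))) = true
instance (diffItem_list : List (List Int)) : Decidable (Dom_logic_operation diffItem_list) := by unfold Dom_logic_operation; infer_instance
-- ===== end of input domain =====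

-- B replaces A's backward deletion loop with a forward sweep that keeps an item only if no
-- already-kept item is a subset of it (objective: simpler). A sorts a copy; the input is not mutated.


-- ===== PORT A =====
-- set(DM_list[n]).issubset(DM_list[m]): every element of a is in b
def pvSubA (a b : List Int) : Bool := a.all (fun x => b.contains x)

-- the inner 'while n < m' scan; true = a subset was found (the break after 'del')
-- (indexing via getD: the loop invariant of A keeps n < m < len, so indices are always in range)
def pvInnerA (l : List (List Int)) (m n : Nat) : Bool :=
  if n < m then
    if pvSubA (l.getD n []) (l.getD m []) then true
    else pvInnerA l m (n + 1)
  else false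
termination_by m - n

-- the outer 'while m > 0' loop: delete index m if the inner scan found a subset, then m -= 1
def pvOuterA (l : List (List Int)) (m : Nat) : List (List Int) :=
  match m with
  | 0 => l
  | Nat.succ m' =>
      if pvInnerA l (m' + 1) 0 then pvOuterA (l.eraseIdx (m' + 1)) m'
      else pvOuterA l m'

def logic_operation (diffItem_list : List (List Int)) : List (List Int) :=
  let DM_list := PySem.List.sorted diffItem_list (fun i => PySem.List.len i) false
  pvOuterA DM_list (DM_list.length - 1)

-- ===== PORT B =====
-- set(k).issubset(item)
def pvSubB (k item : List Int) : Bool := k.all (fun x => item.contains x)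

-- loop body of Source B: append item to kept unless some already-kept element is a subset of it
def pvStepB (kept : List (List Int)) (item : List Int) : List (List Int) :=
  if kept.any (fun k => pvSubB k item) then kept else kept ++ [item]

def logic_operation_alt (diffItem_list : List (List Int)) : List (List Int) :=
  (PySem.List.sorted diffItem_list (fun i => PySem.List.len i) false).foldl pvStepB []

-- ===== PRECONDITION & SPEC =====
def Spec_logic_operation (diffItem_list : List (List Int)) (out : List (List Int)) : Prop := out = logic_operation_alt diffItem_list
instance (diffItem_list : List (List Int)) (out : List (List Int)) : Decidable (Spec_logic_operation diffItem_list out) := by unfold Spec_logic_operation; infer_instance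

-- ===== CLAIM (what is proved, stated in full; the proofs are below) =====
def Claim_equal_logic_operation : Prop := ∀ (diffItem_list : List (List Int)), Dom_logic_operation diffItem_list → Spec_logic_operation diffItem_list (logic_operation diffItem_list)

-- ===== LEMMAS AND PROOFS =====

theorem pvSub_refl (a : List Int) : pvSubA a a = true := by simp [pvSubA]

theorem pvSub_trans {a b c : List Int} (h1 : pvSubA a b = true) (h2 : pvSubA b c = true) :
    pvSubA a c = true := by
  simp only [pvSubA, List.all_eq_true, List.contains_iff_mem] at *
  exact fun x hx => h2 _ (h1 x hx)

-- the inner scan succeeds iff some index in [n, m) holds a subset of index m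
theorem pvInnerA_iff (l : List (List Int)) (m n : Nat) :
    pvInnerA l m n = true ↔ ∃ k, n ≤ k ∧ k < m ∧ pvSubA (l.getD k []) (l.getD m []) = true := by
  induction n using pvInnerA.induct (l := l) (m := m) with
  | case1 n hnm hsub =>
      rw [pvInnerA, if_pos hnm, if_pos hsub]
      exact ⟨fun _ => ⟨n, le_refl n, hnm, hsub⟩, fun _ => rfl⟩
  | case2 n hnm hsub ih =>
      rw [pvInnerA, if_pos hnm, if_neg hsub, ih]
      constructor
      · rintro ⟨k, h1, h2, h3⟩; exact ⟨k, by omega, h2, h3⟩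
      · rintro ⟨k, h1, h2, h3⟩
        refine ⟨k, ?_, h2, h3⟩
        rcases Nat.eq_or_lt_of_le h1 with rfl | h
        · exact absurd h3 hsub
        · omega
  | case3 n hnm =>
      rw [pvInnerA, if_neg hnm]
      simp; omega

-- the outer loop with threshold below a prefix never touches the appended tail
theorem pvOuterA_append (t : List (List Int)) :
    ∀ (m : Nat) (l : List (List Int)), m < l.length → pvOuterA (l ++ t) m = pvOuterA l m ++ t := by
  intro m
  induction m with
  | zero => intro l _; rfl
  | succ m' ih =>
      intro l hm
      have hcond : pvInnerA (l ++ t) (m' + 1) 0 = pvInnerA l (m' + 1) 0 := by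
        rw [Bool.eq_iff_iff, pvInnerA_iff, pvInnerA_iff]
        constructor <;> rintro ⟨k, h1, h2, h3⟩ <;> refine ⟨k, h1, h2, ?_⟩
        · rwa [List.getD_append l t [] k (by omega), List.getD_append l t [] (m' + 1) hm] at h3
        · rw [List.getD_append l t [] k (by omega), List.getD_append l t [] (m' + 1) hm]
          exact h3
      rw [pvOuterA, pvOuterA, hcond]
      by_cases hc : pvInnerA l (m' + 1) 0 = true
      · rw [if_pos hc, if_pos hc, List.eraseIdx_append_of_lt_length (by omega) t,
          ih _ (by rw [List.length_eraseIdx_of_lt (by omega)]; omega)]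
      · rw [if_neg hc, if_neg hc, ih _ (by omega)]

theorem any_iff_exists_getD (l : List (List Int)) (x : List Int) :
    l.any (fun y => pvSubA y x) = true ↔ ∃ k, k < l.length ∧ pvSubA (l.getD k []) x = true := by
  rw [List.any_eq_true]
  constructor
  · rintro ⟨y, hy, hs⟩
    obtain ⟨k, hk, rfl⟩ := List.getElem_of_mem hy |>.imp (fun k h => h)
    exact ⟨k, hk, by rwa [List.getD_eq_getElem _ _ hk]⟩
  · rintro ⟨k, hk, hs⟩
    exact ⟨l.getD k [], by rw [List.getD_eq_getElem _ _ hk]; exact l.getElem_mem hk, by exact hs⟩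

-- one full pass of the outer loop over the last element, seen from the front
theorem pvOuterA_snoc (l : List (List Int)) (x : List Int) :
    pvOuterA (l ++ [x]) l.length =
      (if l.any (fun y => pvSubA y x) then pvOuterA l (l.length - 1)
       else pvOuterA l (l.length - 1) ++ [x]) := by
  rcases List.eq_nil_or_concat l with rfl | ⟨l', y, rfl⟩
  · simp [pvOuterA]
  · rw [List.concat_eq_append] at *
    set L := l' ++ [y] with hL
    have hlen : L.length = l'.length + 1 := by simp [hL]
    rw [hlen, pvOuterA]
    have hcond : pvInnerA (L ++ [x]) (l'.length + 1) 0 = L.any (fun y => pvSubA y x) := by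
      rw [Bool.eq_iff_iff, pvInnerA_iff, any_iff_exists_getD]
      have hgm : (L ++ [x]).getD (l'.length + 1) [] = x := by
        rw [← hlen]; simp
      constructor
      · rintro ⟨k, _, h2, h3⟩
        rw [hgm, List.getD_append L [x] [] k (by omega)] at h3
        exact ⟨k, by omega, h3⟩
      · rintro ⟨k, hk, h3⟩
        refine ⟨k, Nat.zero_le _, by omega, ?_⟩
        rw [hgm, List.getD_append L [x] [] k (by omega)]
        exact h3
    rw [hcond]
    by_cases hc : L.any (fun y => pvSubA y x) = true
    · rw [if_pos hc, if_pos hc]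
      have herase : (L ++ [x]).eraseIdx (l'.length + 1) = L := by
        rw [← hlen]; simp [List.eraseIdx_append_of_length_le (Nat.le_refl _)]
      rw [herase]
      norm_num
    · rw [if_neg hc, if_neg hc]
      rw [pvOuterA_append [x] l'.length L (by omega)]
      norm_num

-- every survivor of B's sweep is an element of the input
theorem mem_foldl_stepB (l : List (List Int)) :
    ∀ z ∈ l.foldl pvStepB [], z ∈ l := by
  induction l using List.reverseRecOn with
  | nil => simp
  | append_singleton l x ih =>
      rw [List.foldl_append]
      intro z hz
      simp only [List.foldl_cons, List.foldl_nil, pvStepB] at hz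
      split at hz
      · exact List.mem_append_left _ (ih z hz)
      · rcases List.mem_append.mp hz with h | h
        · exact List.mem_append_left _ (ih z h)
        · exact List.mem_append_right _ h

-- every input element has a subset among B's survivors (reflexivity + transitivity)
theorem cover_foldl_stepB (l : List (List Int)) :
    ∀ y ∈ l, ∃ z ∈ l.foldl pvStepB [], pvSubA z y = true := by
  induction l using List.reverseRecOn with
  | nil => simp
  | append_singleton l x ih =>
      intro y hy
      rw [List.foldl_append]
      simp only [List.foldl_cons, List.foldl_nil, pvStepB]
      rcases List.mem_append.mp hy with h | h
      · obtain ⟨z, hz, hs⟩ := ih y h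
        split
        · exact ⟨z, hz, hs⟩
        · exact ⟨z, List.mem_append_left _ hz, hs⟩
      · rw [List.mem_singleton] at h
        subst h
        by_cases hc : (l.foldl pvStepB []).any (fun k => pvSubB k y) = true
        · rw [if_pos hc]
          obtain ⟨z, hz, hs⟩ := List.any_eq_true.mp hc
          exact ⟨z, hz, hs⟩
        · rw [if_neg hc]
          exact ⟨y, List.mem_append_right _ (List.mem_singleton.mpr rfl), pvSub_refl y⟩

-- A's backward deletion equals B's forward accumulation on any list
theorem main_eq (l : List (List Int)) :
    pvOuterA l (l.length - 1) = l.foldl pvStepB [] := by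
  induction l using List.reverseRecOn with
  | nil => rfl
  | append_singleton l x ih =>
      have hl : (l ++ [x]).length - 1 = l.length := by simp
      rw [hl, pvOuterA_snoc, List.foldl_append]
      simp only [List.foldl_cons, List.foldl_nil, pvStepB]
      have hcond : (l.any fun y => pvSubA y x) = ((l.foldl pvStepB []).any fun k => pvSubB k x) := by
        rw [Bool.eq_iff_iff, List.any_eq_true, List.any_eq_true]
        constructor
        · rintro ⟨y, hy, hs⟩
          obtain ⟨z, hz, hzy⟩ := cover_foldl_stepB l y hy
          exact ⟨z, hz, pvSub_trans hzy hs⟩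
        · rintro ⟨z, hz, hs⟩
          exact ⟨z, mem_foldl_stepB l z hz, hs⟩
      rw [hcond, ih]

-- ===== VERDICT (by name: the statement is the Claim_ definition above) =====
theorem logic_operation_spec : Claim_equal_logic_operation := by
  intro dl _
  unfold Spec_logic_operation logic_operation logic_operation_alt
  exact main_eq _
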